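-- pv_equiv track=rewrite | github.com/Ellison-Lee/CA-assignment | CA-hw5/Social Media.py | solve
-- ===== SOURCE A (Python) =====
-- def solve(n, m, k, friends, comments):
--     """
--     解决社交媒体评论可见性问题
--
--     参数：
--     n: 当前朋友数
--     m: 评论数
--     k: 平台用户数
--     friends: 当前朋友列表
--     comments: 评论列表，每个元素是 (a, b) 表示用户a在用户b的帖子下评论
--
--     返回：
--     最多添加2个新朋友后能看到的最大评论数
--     """
--     friend_set = set(friends)
--
--     # 分类评论：当前可见、需要1个新朋友、需要2个新朋友
--     visible = 0  # 当前可见的评论数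
--     need_one = {}  # need_one[user] = 添加user作为朋友后能额外看到的评论索引集合
--     need_two = {}  # need_two[(u1, u2)] = 需要同时添加u1和u2才能看到的评论索引集合
--
--     for idx, (a, b) in enumerate(comments):
--         if a == b:
--             # 自己评论自己的帖子
--             if a in friend_set:
--                 visible += 1
--             else:
--                 # 需要添加a作为朋友
--                 if a not in need_one:
--                     need_one[a] = []
--                 need_one[a].append(idx)
--         else:
--             # 评论别人的帖子
--             a_is_friend = a in friend_set
--             b_is_friend = b in friend_set
--
--             if a_is_friend and b_is_friend:
--                 visible += 1
--             elif a_is_friend and not b_is_friend: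
--                 # 需要添加b
--                 if b not in need_one:
--                     need_one[b] = []
--                 need_one[b].append(idx)
--             elif not a_is_friend and b_is_friend:
--                 # 需要添加a
--                 if a not in need_one:
--                     need_one[a] = []
--                 need_one[a].append(idx)
--             else:
--                 # 需要同时添加a和b
--                 key = tuple(sorted([a, b]))
--                 if key not in need_two:
--                     need_two[key] = []
--                 need_two[key].append(idx)
--
--     max_count = visible
--
--     # 情况1：添加1个新朋友
--     for user, comment_indices in need_one.items():
--         count = visible + len(comment_indices)
--         max_count = max(max_count, count)
--
--     # 情况2：添加2个新朋友
--     candidates = list(need_one.keys())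
--
--     # 2.1: 添加两个都在need_one中的朋友
--     for i in range(len(candidates)):
--         for j in range(i + 1, len(candidates)):
--             u1, u2 = candidates[i], candidates[j]
--             # 计算添加u1和u2后能看到的评论
--             seen_indices = set()
--             seen_indices.update(need_one[u1])
--             seen_indices.update(need_one[u2])
--
--             # 检查need_two中是否有恰好需要这两个人的评论
--             key = tuple(sorted([u1, u2]))
--             if key in need_two:
--                 seen_indices.update(need_two[key])
--
--             count = visible + len(seen_indices)
--             max_count = max(max_count, count)
--
--     # 2.2: 添加恰好need_two中的两个人
--     for (u1, u2), comment_indices in need_two.items():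
--         seen_indices = set(comment_indices)
--
--         # 同时检查这两个人在need_one中能带来的评论
--         if u1 in need_one:
--             seen_indices.update(need_one[u1])
--         if u2 in need_one:
--             seen_indices.update(need_one[u2])
--
--         count = visible + len(seen_indices)
--         max_count = max(max_count, count)
--
--     return max_count
-- ===== SOURCE B (Python) =====
-- def solve(n, m, k, friends, comments):
--     """Same answer as A: max comments visible after adding at most 2 friends.
--
--     One pass classifies each comment into visible / need-one-user counts /
--     need-two-users counts (the buckets are disjoint, so sizes add); the best
--     choice is then either the two largest need-one counts, or a need-two pair
--     plus its two users' need-one counts -- no scan over candidate pairs.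
--     """
--     fs = set(friends)
--     visible = 0
--     one = {}
--     two = {}
--     for a, b in comments:
--         fa = a in fs
--         fb = b in fs
--         if fa and (fb or a == b):
--             visible += 1
--         elif fa or fb or a == b:
--             u = b if fa else a
--             one[u] = one.get(u, 0) + 1
--         else:
--             key = (a, b) if a < b else (b, a)
--             two[key] = two.get(key, 0) + 1
--     top1 = 0
--     top2 = 0
--     for c in one.values():
--         if c > top1:
--             top2 = top1
--             top1 = c
--         elif c > top2:
--             top2 = c
--     best = top1 + top2
--     for (u1, u2), c in two.items():
--         cand = c + one.get(u1, 0) + one.get(u2, 0)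
--         if cand > best:
--             best = cand
--     return visible + best
-- ===== Notes on version B (the rewrite author's own statement) =====
-- stated objective: alternative
-- what changed: A enumerates all pairs of one-friend candidates and takes set unions of index lists; B keeps only per-user/per-pair counts (the buckets are disjoint, so sizes add), a running top-2 of the one-friend counts and one linear pass over the two-friend buckets, with no pair enumeration.
import Mathlib
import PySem

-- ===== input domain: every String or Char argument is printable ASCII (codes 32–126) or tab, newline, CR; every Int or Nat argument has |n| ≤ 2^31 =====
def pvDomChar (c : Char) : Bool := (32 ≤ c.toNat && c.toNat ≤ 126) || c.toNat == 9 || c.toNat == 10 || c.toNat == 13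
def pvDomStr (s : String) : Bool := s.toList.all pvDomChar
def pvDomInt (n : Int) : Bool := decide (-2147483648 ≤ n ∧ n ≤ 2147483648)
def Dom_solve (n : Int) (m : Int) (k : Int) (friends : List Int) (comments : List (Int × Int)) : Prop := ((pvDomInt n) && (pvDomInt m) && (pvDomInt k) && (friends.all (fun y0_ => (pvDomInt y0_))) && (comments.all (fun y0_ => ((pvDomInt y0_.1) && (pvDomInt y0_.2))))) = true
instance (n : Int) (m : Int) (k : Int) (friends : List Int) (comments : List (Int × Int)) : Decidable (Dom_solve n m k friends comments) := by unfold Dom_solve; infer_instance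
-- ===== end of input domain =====

-- B replaces A's scan over all pairs of one-friend candidates with set unions by
-- a single count pass, a running top-2 maximum and one pass over the two-friend
-- buckets (the buckets are disjoint, so sizes add).

-- ===== PORT A =====
def solve (n : Int) (m : Int) (k : Int) (friends : List Int) (comments : List (Int × Int)) : Int :=
  let friend_set := PySem.Set.ofList friends
  -- classification loop: state = (visible, need_one, need_two)
  let st := (PySem.List.enumerate comments).foldl
    (fun (st : Int × PySem.Dict Int (List Int) × PySem.Dict (Int × Int) (List Int)) q =>
      let idx := q.1
      let a := q.2.1
      let b := q.2.2
      if a = b then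
        if PySem.Set.contains friend_set a then (st.1 + 1, st.2.1, st.2.2)
        else
          -- 'if a not in need_one: need_one[a] = []; need_one[a].append(idx)'
          (st.1, st.2.1.modify a [] (fun l => l ++ [idx]), st.2.2)
      else
        let a_is_friend := PySem.Set.contains friend_set a
        let b_is_friend := PySem.Set.contains friend_set b
        if a_is_friend && b_is_friend then (st.1 + 1, st.2.1, st.2.2)
        else if a_is_friend && !b_is_friend then
          (st.1, st.2.1.modify b [] (fun l => l ++ [idx]), st.2.2)
        else if !a_is_friend && b_is_friend then
          (st.1, st.2.1.modify a [] (fun l => l ++ [idx]), st.2.2)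
        else
          -- key = tuple(sorted([a, b])), here with a ≠ b
          let key := if a < b then (a, b) else (b, a)
          (st.1, st.2.1, st.2.2.modify key [] (fun l => l ++ [idx])))
    (0, PySem.Dict.empty, PySem.Dict.empty)
  let visible := st.1
  let need_one := st.2.1
  let need_two := st.2.2
  let max_count := visible
  -- case 1: add one new friend
  let max_count := need_one.items.foldl
    (fun mc p => max mc (visible + (p.2.length : Int))) max_count
  -- case 2.1: add two friends, both from need_one
  let candidates := need_one.keys
  let max_count := (PySem.List.pyRange 0 (candidates.length : Int) 1).foldl
    (fun mc i =>
      (PySem.List.pyRange (i + 1) (candidates.length : Int) 1).foldl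
        (fun mc j =>
          -- candidates[i] / candidates[j]: in range, so ported with default 0
          let u1 := PySem.List.pyGetD candidates i 0
          let u2 := PySem.List.pyGetD candidates j 0
          let seen := PySem.Set.update
            (PySem.Set.update PySem.Set.empty (need_one.getD u1 []))
            (need_one.getD u2 [])
          -- key = tuple(sorted([u1, u2])), u1 ≠ u2
          let key := if u1 < u2 then (u1, u2) else (u2, u1)
          let seen := if need_two.contains key then PySem.Set.update seen (need_two.getD key []) else seen
          max mc (visible + (seen.length : Int))) mc) max_count
  -- case 2.2: add exactly the two users of a need_two key
  let max_count := need_two.items.foldl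
    (fun mc p =>
      let seen := PySem.Set.ofList p.2
      let seen := if need_one.contains p.1.1 then PySem.Set.update seen (need_one.getD p.1.1 []) else seen
      let seen := if need_one.contains p.1.2 then PySem.Set.update seen (need_one.getD p.1.2 []) else seen
      max mc (visible + (seen.length : Int))) max_count
  max_count

-- ===== PORT B =====
def solve_alt (n : Int) (m : Int) (k : Int) (friends : List Int) (comments : List (Int × Int)) : Int :=
  let fs := PySem.Set.ofList friends
  -- one pass: state = (visible, one, two) with counts only
  let st := comments.foldl
    (fun (st : Int × PySem.Dict Int Int × PySem.Dict (Int × Int) Int) c =>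
      let a := c.1
      let b := c.2
      let fa := PySem.Set.contains fs a
      let fb := PySem.Set.contains fs b
      if fa && (fb || a == b) then (st.1 + 1, st.2.1, st.2.2)
      else if fa || fb || a == b then
        let u := if fa then b else a
        (st.1, st.2.1.modify u 0 (fun c => c + 1), st.2.2)
      else
        let key := if a < b then (a, b) else (b, a)
        (st.1, st.2.1, st.2.2.modify key 0 (fun c => c + 1)))
    (0, PySem.Dict.empty, PySem.Dict.empty)
  let visible := st.1
  let one := st.2.1
  let two := st.2.2
  -- running top-2 of the one-friend counts
  let tops := one.values.foldl
    (fun (t : Int × Int) c =>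
      if c > t.1 then (c, t.1) else if c > t.2 then (t.1, c) else t) (0, 0)
  let best := tops.1 + tops.2
  -- each two-friend bucket, plus the two users' own one-friend counts
  let best := two.items.foldl
    (fun best p =>
      let cand := p.2 + one.getD p.1.1 0 + one.getD p.1.2 0
      if cand > best then cand else best) best
  visible + best

-- ===== PRECONDITION & SPEC =====
def Spec_solve (n : Int) (m : Int) (k : Int) (friends : List Int) (comments : List (Int × Int)) (out : Int) : Prop := out = solve_alt n m k friends comments
instance (n : Int) (m : Int) (k : Int) (friends : List Int) (comments : List (Int × Int)) (out : Int) : Decidable (Spec_solve n m k friends comments out) := by unfold Spec_solve; infer_instance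

-- ===== CLAIM (what is proved, stated in full; the proofs are below) =====
def Claim_equal_solve : Prop := ∀ (n : Int) (m : Int) (k : Int) (friends : List Int) (comments : List (Int × Int)), Dom_solve n m k friends comments → Spec_solve n m k friends comments (solve n m k friends comments)

-- ===== LEMMAS AND PROOFS =====

-- named copies of the two loop bodies, for the proofs (definitionally equal to the ports)
def stepA (fs : PySem.Set Int)
    (st : Int × PySem.Dict Int (List Int) × PySem.Dict (Int × Int) (List Int))
    (q : Int × (Int × Int)) : Int × PySem.Dict Int (List Int) × PySem.Dict (Int × Int) (List Int) :=
  let idx := q.1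
  let a := q.2.1
  let b := q.2.2
  if a = b then
    if PySem.Set.contains fs a then (st.1 + 1, st.2.1, st.2.2)
    else (st.1, st.2.1.modify a [] (fun l => l ++ [idx]), st.2.2)
  else
    let a_is_friend := PySem.Set.contains fs a
    let b_is_friend := PySem.Set.contains fs b
    if a_is_friend && b_is_friend then (st.1 + 1, st.2.1, st.2.2)
    else if a_is_friend && !b_is_friend then
      (st.1, st.2.1.modify b [] (fun l => l ++ [idx]), st.2.2)
    else if !a_is_friend && b_is_friend then
      (st.1, st.2.1.modify a [] (fun l => l ++ [idx]), st.2.2)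
    else
      let key := if a < b then (a, b) else (b, a)
      (st.1, st.2.1, st.2.2.modify key [] (fun l => l ++ [idx]))

def stepB (fs : PySem.Set Int)
    (st : Int × PySem.Dict Int Int × PySem.Dict (Int × Int) Int)
    (c : Int × Int) : Int × PySem.Dict Int Int × PySem.Dict (Int × Int) Int :=
  let a := c.1
  let b := c.2
  let fa := PySem.Set.contains fs a
  let fb := PySem.Set.contains fs b
  if fa && (fb || a == b) then (st.1 + 1, st.2.1, st.2.2)
  else if fa || fb || a == b then
    let u := if fa then b else a
    (st.1, st.2.1.modify u 0 (fun c => c + 1), st.2.2)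
  else
    let key := if a < b then (a, b) else (b, a)
    (st.1, st.2.1, st.2.2.modify key 0 (fun c => c + 1))

def lenI (l : List Int) : Int := (l.length : Int)

def mapVals {κ ν ω : Type} (g : ν → ω) (d : PySem.Dict κ ν) : PySem.Dict κ ω :=
  ⟨d.items.map (fun p => (p.1, g p.2))⟩

def finishA (visible : Int) (need_one : PySem.Dict Int (List Int))
    (need_two : PySem.Dict (Int × Int) (List Int)) : Int :=
  let max_count := visible
  let max_count := need_one.items.foldl
    (fun mc p => max mc (visible + (p.2.length : Int))) max_count
  let candidates := need_one.keys
  let max_count := (PySem.List.pyRange 0 (candidates.length : Int) 1).foldl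
    (fun mc i =>
      (PySem.List.pyRange (i + 1) (candidates.length : Int) 1).foldl
        (fun mc j =>
          let u1 := PySem.List.pyGetD candidates i 0
          let u2 := PySem.List.pyGetD candidates j 0
          let seen := PySem.Set.update
            (PySem.Set.update PySem.Set.empty (need_one.getD u1 []))
            (need_one.getD u2 [])
          let key := if u1 < u2 then (u1, u2) else (u2, u1)
          let seen := if need_two.contains key then PySem.Set.update seen (need_two.getD key []) else seen
          max mc (visible + (seen.length : Int))) mc) max_count
  let max_count := need_two.items.foldl
    (fun mc p =>
      let seen := PySem.Set.ofList p.2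
      let seen := if need_one.contains p.1.1 then PySem.Set.update seen (need_one.getD p.1.1 []) else seen
      let seen := if need_one.contains p.1.2 then PySem.Set.update seen (need_one.getD p.1.2 []) else seen
      max mc (visible + (seen.length : Int))) max_count
  max_count

def finishB (visible : Int) (one : PySem.Dict Int Int)
    (two : PySem.Dict (Int × Int) Int) : Int :=
  let tops := one.values.foldl
    (fun (t : Int × Int) c =>
      if c > t.1 then (c, t.1) else if c > t.2 then (t.1, c) else t) (0, 0)
  let best := tops.1 + tops.2
  let best := two.items.foldl
    (fun best p =>
      let cand := p.2 + one.getD p.1.1 0 + one.getD p.1.2 0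
      if cand > best then cand else best) best
  visible + best

lemma solve_eq (n m k : Int) (friends : List Int) (comments : List (Int × Int)) :
    solve n m k friends comments =
      (let st := (PySem.List.enumerate comments).foldl (stepA (PySem.Set.ofList friends))
        (0, PySem.Dict.empty, PySem.Dict.empty)
      finishA st.1 st.2.1 st.2.2) := rfl

lemma solve_alt_eq (n m k : Int) (friends : List Int) (comments : List (Int × Int)) :
    solve_alt n m k friends comments =
      (let st := comments.foldl (stepB (PySem.Set.ofList friends))
        (0, PySem.Dict.empty, PySem.Dict.empty)
      finishB st.1 st.2.1 st.2.2) := rfl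

lemma foldl_max_le {β : Type} (l : List β) (f : β → Int) (b : Int) :
    ∀ i : Int, i ≤ b → (∀ x ∈ l, f x ≤ b) → l.foldl (fun a x => max a (f x)) i ≤ b := by
  induction l with
  | nil => intro i hi _; simpa using hi
  | cons x xs ih =>
    intro i hi h
    simp only [List.foldl_cons]
    exact ih _ (max_le hi (h x (by simp))) (fun y hy => h y (by simp [hy]))

lemma foldl_le_of_step_le {β : Type} (g : Int → β → Int) (hg : ∀ a x, a ≤ g a x) :
    ∀ (l : List β) (a : Int), a ≤ l.foldl g a := by
  intro l
  induction l with
  | nil => intro a; simp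
  | cons x xs ih => intro a; simpa using le_trans (hg a x) (ih (g a x))

lemma nested_ge (l1 : List Int) (l2 : Int → List Int) (s : Int → Int → Int) :
    ∀ (init : Int) (i j : Int), i ∈ l1 → j ∈ l2 i →
      s i j ≤ l1.foldl (fun a i => (l2 i).foldl (fun a j => max a (s i j)) a) init := by
  induction l1 with
  | nil => intro _ i j hi; simp at hi
  | cons x xs ih =>
    intro init i j hi hj
    simp only [List.foldl_cons]
    rcases List.mem_cons.mp hi with h | h
    · subst h
      refine le_trans ((PySem.List.le_foldl_max_int (l2 i) (s i) init).2 j hj) ?_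
      exact foldl_le_of_step_le _ (fun a y => (PySem.List.le_foldl_max_int (l2 y) (s y) a).1) xs _
    · exact ih _ i j h hj

lemma nested_le (l1 : List Int) (l2 : Int → List Int) (s : Int → Int → Int) (b : Int) :
    ∀ init : Int, init ≤ b → (∀ i ∈ l1, ∀ j ∈ l2 i, s i j ≤ b) →
      l1.foldl (fun a i => (l2 i).foldl (fun a j => max a (s i j)) a) init ≤ b := by
  induction l1 with
  | nil => intro i hi _; simpa using hi
  | cons x xs ih =>
    intro init hi h
    simp only [List.foldl_cons]
    refine ih _ (foldl_max_le _ _ _ _ hi (fun j hj => h x (by simp) j hj)) ?_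
    exact fun i hi j hj => h i (by simp [hi]) j hj

lemma items_mapVals {κ ν ω : Type} [BEq κ] (g : ν → ω) (d : PySem.Dict κ ν) :
    (mapVals g d).items = d.items.map (fun p => (p.1, g p.2)) := rfl

lemma values_mapVals {κ ν ω : Type} [BEq κ] (g : ν → ω) (d : PySem.Dict κ ν) :
    (mapVals g d).values = d.values.map g := by
  simp [PySem.Dict.values, items_mapVals, List.map_map, Function.comp_def]

lemma get?_mapVals {κ ν ω : Type} [BEq κ] (g : ν → ω) (d : PySem.Dict κ ν) (k : κ) :
    (mapVals g d).get? k = (d.get? k).map g := by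
  simp only [PySem.Dict.get?, items_mapVals, List.find?_map, Option.map_map]
  have hp : ((fun (p : κ × ω) => p.1 == k) ∘ fun (p : κ × ν) => (p.1, g p.2)) = (fun p => p.1 == k) := by
    ext p; simp
  rw [hp]
  congr 1

lemma getD_mapVals_of_contains {κ ν ω : Type} [BEq κ] [LawfulBEq κ] (g : ν → ω) (d : PySem.Dict κ ν)
    (k : κ) (h : d.contains k = true) (d0 : ω) (dv : ν) :
    (mapVals g d).getD k d0 = g (d.getD k dv) := by
  rw [PySem.Dict.contains_eq_isSome_get?] at h
  cases hg : d.get? k with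
  | none => rw [hg] at h; simp at h
  | some v =>
    rw [PySem.Dict.getD_eq_get?_getD, PySem.Dict.getD_eq_get?_getD, get?_mapVals, hg]
    simp

lemma contains_mapVals {κ ν ω : Type} [BEq κ] [LawfulBEq κ] (g : ν → ω) (d : PySem.Dict κ ν) (k : κ) :
    (mapVals g d).contains k = d.contains k := by
  rw [PySem.Dict.contains_eq_isSome_get?, PySem.Dict.contains_eq_isSome_get?, get?_mapVals]
  simp

lemma getD_mapVals_zero (d : PySem.Dict Int (List Int)) (u : Int) :
    (mapVals lenI d).getD u 0 = if d.contains u then lenI (d.getD u []) else 0 := by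
  rw [PySem.Dict.getD_eq_get?_getD, PySem.Dict.getD_eq_get?_getD, get?_mapVals,
    PySem.Dict.contains_eq_isSome_get?]
  cases h : d.get? u <;> simp

lemma mapVals_modify_append {κ : Type} [BEq κ] [LawfulBEq κ] (d : PySem.Dict κ (List Int)) (k : κ) (idx : Int) :
    mapVals lenI (d.modify k [] (fun l => l ++ [idx])) = (mapVals lenI d).modify k 0 (fun c => c + 1) := by
  apply PySem.Dict.ext
  simp only [PySem.Dict.modify, PySem.Dict.insert, contains_mapVals, items_mapVals]
  by_cases h : d.contains k
  · simp only [h, if_true]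
    simp only [List.map_map]
    apply List.map_congr_left
    intro p _
    simp only [Function.comp_apply]
    by_cases hp : p.1 == k
    · simp only [hp, if_true]
      rw [getD_mapVals_of_contains lenI d k h 0 []]
      simp [lenI]
    · simp [hp]
  · have hc : (mapVals lenI d).contains k = false := by rw [contains_mapVals]; simpa using h
    simp only [h, if_false, List.map_append]
    simp [lenI, PySem.Dict.getD_of_not_contains _ 0 hc,
      PySem.Dict.getD_of_not_contains d ([] : List Int) (by simpa using h)]


lemma stepB_eq (fs : PySem.Set Int) (vis : Int) (o : PySem.Dict Int (List Int))
    (t : PySem.Dict (Int × Int) (List Int)) (i : Int) (c : Int × Int) :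
    stepB fs (vis, mapVals lenI o, mapVals lenI t) c =
      ((stepA fs (vis, o, t) (i, c)).1,
       mapVals lenI (stepA fs (vis, o, t) (i, c)).2.1,
       mapVals lenI (stepA fs (vis, o, t) (i, c)).2.2) := by
  obtain ⟨a, b⟩ := c
  unfold stepA stepB
  by_cases hab : a = b
  · subst hab
    by_cases ha : a ∈ fs <;> simp [ha, mapVals_modify_append]
  · by_cases ha : a ∈ fs <;> by_cases hb : b ∈ fs <;>
      simp [hab, ha, hb, mapVals_modify_append]

lemma phase1 (fs : PySem.Set Int) : ∀ (cs : List (Int × Int)) (s vis : Int)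
    (o : PySem.Dict Int (List Int)) (t : PySem.Dict (Int × Int) (List Int)),
    cs.foldl (stepB fs) (vis, mapVals lenI o, mapVals lenI t) =
      (((PySem.List.enumerate cs s).foldl (stepA fs) (vis, o, t)).1,
       mapVals lenI ((PySem.List.enumerate cs s).foldl (stepA fs) (vis, o, t)).2.1,
       mapVals lenI ((PySem.List.enumerate cs s).foldl (stepA fs) (vis, o, t)).2.2) := by
  intro cs
  induction cs with
  | nil => intro s vis o t; simp [PySem.List.enumerate]
  | cons c cs ih =>
    intro s vis o t
    rw [PySem.List.enumerate_cons]
    simp only [List.foldl_cons]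
    rw [stepB_eq fs vis o t s c, ih (s+1) _ _ _]

def InvA (s : Int) (o : PySem.Dict Int (List Int)) (t : PySem.Dict (Int × Int) (List Int)) : Prop :=
  (∀ u x, x ∈ o.getD u [] → x < s) ∧
  (∀ p x, x ∈ t.getD p [] → x < s) ∧
  (∀ u, (o.getD u []).Nodup) ∧
  (∀ p, (t.getD p []).Nodup) ∧
  (∀ u v, u ≠ v → ∀ x ∈ o.getD u [], x ∉ o.getD v []) ∧
  (∀ p q, p ≠ q → ∀ x ∈ t.getD p [], x ∉ t.getD q []) ∧
  (∀ u p x, x ∈ o.getD u [] → x ∉ t.getD p []) ∧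
  (∀ p ∈ t.keys, p.1 < p.2) ∧
  o.keys.Nodup ∧ t.keys.Nodup

lemma InvA_init : InvA 0 PySem.Dict.empty PySem.Dict.empty := by
  refine ⟨?_, ?_, ?_, ?_, ?_, ?_, ?_, ?_, ?_, ?_⟩ <;>
    simp [PySem.Dict.getD_empty, PySem.Dict.keys_empty]

lemma InvA_mono {s s' : Int} {o : PySem.Dict Int (List Int)}
    {t : PySem.Dict (Int × Int) (List Int)} (h : InvA s o t) (hs : s ≤ s') : InvA s' o t := by
  obtain ⟨h1, h2, h3⟩ := h
  exact ⟨fun u x hx => lt_of_lt_of_le (h1 u x hx) hs,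
         fun p x hx => lt_of_lt_of_le (h2 p x hx) hs, h3⟩

lemma nodup_keys_modify {κ ν : Type} [BEq κ] [LawfulBEq κ] (d : PySem.Dict κ ν)
    (k : κ) (d0 : ν) (f : ν → ν) (h : d.keys.Nodup) : (d.modify k d0 f).keys.Nodup := by
  rw [PySem.Dict.keys_modify]
  by_cases hc : d.contains k
  · rwa [PySem.Dict.keys_insert_of_contains _ _ hc]
  · rw [PySem.Dict.keys_insert_of_not_contains _ _ (by simpa using hc)]
    simp only [List.nodup_append, List.nodup_cons]
    refine ⟨h, by simp, ?_⟩
    intro a ha b hb hab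
    rw [List.mem_singleton] at hb
    exact hc ((PySem.Dict.contains_iff_mem_keys d k).mpr ((hab.trans hb) ▸ ha))

lemma mem_keys_modify {κ ν : Type} [BEq κ] [LawfulBEq κ] (d : PySem.Dict κ ν)
    (k k' : κ) (d0 : ν) (f : ν → ν) :
    k' ∈ (d.modify k d0 f).keys ↔ k' = k ∨ k' ∈ d.keys := by
  rw [PySem.Dict.keys_modify, PySem.Dict.mem_keys_insert]

lemma InvA_modify_one {s : Int} {o : PySem.Dict Int (List Int)}
    {t : PySem.Dict (Int × Int) (List Int)} (h : InvA s o t) (w : Int) :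
    InvA (s + 1) (o.modify w [] (fun l => l ++ [s])) t := by
  obtain ⟨hb1, hb2, hn1, hn2, hd1, hd2, hx, hk, hko, hkt⟩ := h
  have hg : ∀ u, (o.modify w [] (fun l => l ++ [s])).getD u [] =
      if u = w then o.getD w [] ++ [s] else o.getD u [] := fun u =>
    PySem.Dict.getD_modify o w u [] (fun l => l ++ [s])
  refine ⟨?_, ?_, ?_, ?_, ?_, ?_, ?_, hk, nodup_keys_modify o w [] _ hko, hkt⟩
  · intro u x hx'
    rw [hg] at hx'
    split_ifs at hx' with hu
    · rcases List.mem_append.mp hx' with hm | hm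
      · exact lt_trans (hb1 w x hm) (by omega)
      · simp at hm; omega
    · exact lt_trans (hb1 u x hx') (by omega)
  · exact fun p x hx' => lt_trans (hb2 p x hx') (by omega)
  · intro u
    rw [hg]
    split_ifs with hu
    · exact List.Nodup.append (hn1 w) (by simp) (by
        intro x hx' hs'
        simp only [List.mem_singleton] at hs'
        exact absurd (hb1 w x hx') (by omega))
    · exact hn1 u
  · exact hn2
  · intro u v huv x hxu hxv
    rw [hg] at hxu hxv
    split_ifs at hxu hxv with hu hv hv
    · exact huv (hu.trans hv.symm)
    · rw [hu] at huv
      rcases List.mem_append.mp hxu with hm | hm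
      · exact hd1 w v huv x hm hxv
      · simp only [List.mem_singleton] at hm; subst hm
        exact absurd (hb1 v x hxv) (by omega)
    · rw [hv] at huv
      rcases List.mem_append.mp hxv with hm | hm
      · exact (hd1 u w huv x hxu) hm
      · simp only [List.mem_singleton] at hm; subst hm
        exact absurd (hb1 u x hxu) (by omega)
    · exact hd1 u v huv x hxu hxv
  · exact hd2
  · intro u p x hxu
    rw [hg] at hxu
    split_ifs at hxu with hu
    · rcases List.mem_append.mp hxu with hm | hm
      · exact hx w p x hm
      · simp at hm; subst hm
        intro hc
        exact absurd (hb2 p x hc) (by omega)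
    · exact hx u p x hxu

lemma InvA_modify_two {s : Int} {o : PySem.Dict Int (List Int)}
    {t : PySem.Dict (Int × Int) (List Int)} (h : InvA s o t) (w : Int × Int) (hw : w.1 < w.2) :
    InvA (s + 1) o (t.modify w [] (fun l => l ++ [s])) := by
  obtain ⟨hb1, hb2, hn1, hn2, hd1, hd2, hx, hk, hko, hkt⟩ := h
  have hg : ∀ p, (t.modify w [] (fun l => l ++ [s])).getD p [] =
      if p = w then t.getD w [] ++ [s] else t.getD p [] := fun p =>
    PySem.Dict.getD_modify t w p [] (fun l => l ++ [s])
  refine ⟨?_, ?_, hn1, ?_, hd1, ?_, ?_, ?_, hko, nodup_keys_modify t w [] _ hkt⟩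
  · exact fun u x hx' => lt_trans (hb1 u x hx') (by omega)
  · intro p x hx'
    rw [hg] at hx'
    split_ifs at hx' with hp
    · rcases List.mem_append.mp hx' with hm | hm
      · exact lt_trans (hb2 w x hm) (by omega)
      · simp at hm; omega
    · exact lt_trans (hb2 p x hx') (by omega)
  · intro p
    rw [hg]
    split_ifs with hp
    · exact List.Nodup.append (hn2 w) (by simp) (by
        intro x hx' hs'
        simp only [List.mem_singleton] at hs'
        exact absurd (hb2 w x hx') (by omega))
    · exact hn2 p
  · intro p q hpq x hxp hxq
    rw [hg] at hxp hxq
    split_ifs at hxp hxq with hp hq hq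
    · exact hpq (hp.trans hq.symm)
    · rw [hp] at hpq
      rcases List.mem_append.mp hxp with hm | hm
      · exact hd2 w q hpq x hm hxq
      · simp only [List.mem_singleton] at hm; subst hm
        exact absurd (hb2 q x hxq) (by omega)
    · rw [hq] at hpq
      rcases List.mem_append.mp hxq with hm | hm
      · exact (hd2 p w hpq x hxp) hm
      · simp only [List.mem_singleton] at hm; subst hm
        exact absurd (hb2 p x hxp) (by omega)
    · exact hd2 p q hpq x hxp hxq
  · intro u p x hxu
    rw [hg]
    split_ifs with hp
    · intro hc
      rcases List.mem_append.mp hc with hm | hm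
      · exact (hx u w x hxu) hm
      · simp only [List.mem_singleton] at hm; subst hm
        exact absurd (hb1 u x hxu) (by omega)
    · exact hx u p x hxu
  · intro p hp
    rcases (mem_keys_modify t w p [] _).mp hp with hpw | hpo
    · rw [hpw]; exact hw
    · exact hk p hpo

lemma InvA_step (fs : PySem.Set Int) (vis s : Int) (c : Int × Int)
    {o : PySem.Dict Int (List Int)} {t : PySem.Dict (Int × Int) (List Int)}
    (h : InvA s o t) :
    InvA (s + 1) (stepA fs (vis, o, t) (s, c)).2.1 (stepA fs (vis, o, t) (s, c)).2.2 := by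
  obtain ⟨a, b⟩ := c
  unfold stepA
  by_cases hab : a = b
  · subst hab
    by_cases ha : a ∈ fs <;> simp only [if_pos, if_neg, ha, if_true, if_false] <;>
      simp [ha]
    · exact InvA_mono h (by omega)
    · exact InvA_modify_one h a
  · by_cases ha : a ∈ fs <;> by_cases hb : b ∈ fs <;> simp [hab, ha, hb]
    · exact InvA_mono h (by omega)
    · exact InvA_modify_one h b
    · exact InvA_modify_one h a
    · rcases lt_or_gt_of_ne hab with hlt | hgt
      · simpa [hlt] using InvA_modify_two h (a, b) hlt
      · simpa [not_lt_of_gt hgt] using InvA_modify_two h (b, a) hgt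

lemma InvA_fold (fs : PySem.Set Int) : ∀ (cs : List (Int × Int)) (s vis : Int)
    (o : PySem.Dict Int (List Int)) (t : PySem.Dict (Int × Int) (List Int)),
    InvA s o t →
    ∃ s', InvA s' ((PySem.List.enumerate cs s).foldl (stepA fs) (vis, o, t)).2.1
      ((PySem.List.enumerate cs s).foldl (stepA fs) (vis, o, t)).2.2 := by
  intro cs
  induction cs with
  | nil => intro s vis o t h; exact ⟨s, by simpa [PySem.List.enumerate] using h⟩
  | cons c cs ih =>
    intro s vis o t h
    rw [PySem.List.enumerate_cons]
    simp only [List.foldl_cons]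
    have h' := InvA_step fs vis s c h
    have := ih (s + 1) (stepA fs (vis, o, t) (s, c)).1 _ _ h'
    simpa using this

def top2step : Int × Int → Int → Int × Int := fun t c =>
  if c > t.1 then (c, t.1) else if c > t.2 then (t.1, c) else t

lemma top2step_eq (t : Int × Int) (c : Int) :
    top2step t c = if c > t.1 then (c, t.1) else if c > t.2 then (t.1, c) else t := rfl

lemma getD_append_lt (l : List Int) (c : Int) {i : Nat} (h : i < l.length) :
    (l ++ [c]).getD i 0 = l.getD i 0 := by
  rw [List.getD_eq_getElem _ _ (by simp; omega), List.getD_eq_getElem _ _ h,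
    List.getElem_append_left h]

lemma getD_append_last (l : List Int) (c : Int) :
    (l ++ [c]).getD l.length 0 = c := by
  rw [List.getD_eq_getElem _ _ (by simp)]
  simp

lemma getD_mem (l : List Int) {i : Nat} (h : i < l.length) : l.getD i 0 ∈ l := by
  rw [List.getD_eq_getElem _ _ h]
  exact List.getElem_mem h

lemma top2_spec (vals : List Int) (hpos : ∀ v ∈ vals, 0 ≤ v) :
    (0 ≤ (vals.foldl top2step (0, 0)).2 ∧ (vals.foldl top2step (0, 0)).2 ≤ (vals.foldl top2step (0, 0)).1) ∧
    (∀ v ∈ vals, v ≤ (vals.foldl top2step (0, 0)).1) ∧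
    (∀ i j : Nat, i < j → j < vals.length →
      vals.getD i 0 + vals.getD j 0 ≤ (vals.foldl top2step (0, 0)).1 + (vals.foldl top2step (0, 0)).2) ∧
    ((vals.foldl top2step (0, 0)).1 = 0 ∨
      ∃ i : Nat, i < vals.length ∧ (vals.foldl top2step (0, 0)).1 = vals.getD i 0) ∧
    ((vals.foldl top2step (0, 0)).1 + (vals.foldl top2step (0, 0)).2 = 0 ∨
     (∃ i : Nat, i < vals.length ∧ (vals.foldl top2step (0, 0)).1 + (vals.foldl top2step (0, 0)).2 = vals.getD i 0) ∨
     (∃ i j : Nat, i < j ∧ j < vals.length ∧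
       (vals.foldl top2step (0, 0)).1 + (vals.foldl top2step (0, 0)).2 = vals.getD i 0 + vals.getD j 0)) := by
  induction vals using List.reverseRecOn with
  | nil => simp
  | append_singleton l c ih =>
    have hposl : ∀ v ∈ l, 0 ≤ v := fun v hv => hpos v (by simp [hv])
    have hc0 : 0 ≤ c := hpos c (by simp)
    obtain ⟨⟨hT2, hT21⟩, hii, hiii, hiv, hv⟩ := ih hposl
    rw [List.foldl_append]
    have hlen : (l ++ [c]).length = l.length + 1 := by simp
    simp only [List.foldl_cons, List.foldl_nil]
    set T := l.foldl top2step (0, 0) with hT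
    rw [top2step_eq]
    split_ifs with h1 h2
    -- case c > T.1 : new state (c, T.1)
    · refine ⟨⟨by omega, by omega⟩, ?_, ?_, ?_, ?_⟩
      · intro v hv'
        rcases List.mem_append.mp hv' with hm | hm
        · exact le_trans (hii v hm) (by omega)
        · simp only [List.mem_singleton] at hm; omega
      · intro i j hij hj
        rw [hlen] at hj
        rcases Nat.lt_or_ge j l.length with hjl | hjl
        · rw [getD_append_lt _ _ (by omega), getD_append_lt _ _ hjl]
          have := hiii i j hij hjl
          omega
        · have hjeq : j = l.length := by omega
          subst hjeq
          rw [getD_append_lt _ _ (by omega), getD_append_last]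
          have := hii (l.getD i 0) (getD_mem l (by omega))
          omega
      · right
        exact ⟨l.length, by omega, by rw [getD_append_last]⟩
      · rcases hiv with h0 | ⟨i, hi, hieq⟩
        · right; left
          exact ⟨l.length, by omega, by rw [getD_append_last]; show c + T.1 = c; omega⟩
        · right; right
          exact ⟨i, l.length, hi, by omega, by
            rw [getD_append_lt _ _ hi, getD_append_last]
            show c + T.1 = l.getD i 0 + c; omega⟩
    -- case ¬(c > T.1), c > T.2 : new state (T.1, c)
    · refine ⟨⟨by omega, by omega⟩, ?_, ?_, ?_, ?_⟩
      · intro v hv'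
        rcases List.mem_append.mp hv' with hm | hm
        · exact le_trans (hii v hm) (by omega)
        · simp only [List.mem_singleton] at hm; omega
      · intro i j hij hj
        rw [hlen] at hj
        rcases Nat.lt_or_ge j l.length with hjl | hjl
        · rw [getD_append_lt _ _ (by omega), getD_append_lt _ _ hjl]
          have := hiii i j hij hjl
          omega
        · have hjeq : j = l.length := by omega
          subst hjeq
          rw [getD_append_lt _ _ (by omega), getD_append_last]
          have := hii (l.getD i 0) (getD_mem l (by omega))
          omega
      · rcases hiv with h0 | ⟨i, hi, hieq⟩
        · left; exact h0
        · right; exact ⟨i, by omega, by rw [getD_append_lt _ _ hi]; exact hieq⟩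
      · rcases hiv with h0 | ⟨i, hi, hieq⟩
        · right; left
          exact ⟨l.length, by omega, by rw [getD_append_last]; show T.1 + c = c; omega⟩
        · right; right
          exact ⟨i, l.length, hi, by omega, by
            rw [getD_append_lt _ _ hi, getD_append_last]
            show T.1 + c = l.getD i 0 + c; omega⟩
    -- case unchanged
    · refine ⟨⟨by omega, by omega⟩, ?_, ?_, ?_, ?_⟩
      · intro v hv'
        rcases List.mem_append.mp hv' with hm | hm
        · exact hii v hm
        · simp only [List.mem_singleton] at hm; omega
      · intro i j hij hj
        rw [hlen] at hj
        rcases Nat.lt_or_ge j l.length with hjl | hjl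
        · rw [getD_append_lt _ _ (by omega), getD_append_lt _ _ hjl]
          exact hiii i j hij hjl
        · have hjeq : j = l.length := by omega
          subst hjeq
          rw [getD_append_lt _ _ (by omega), getD_append_last]
          have := hii (l.getD i 0) (getD_mem l (by omega))
          omega
      · rcases hiv with h0 | ⟨i, hi, hieq⟩
        · left; omega
        · right; exact ⟨i, by omega, by rw [getD_append_lt _ _ hi]; omega⟩
      · rcases hv with h0 | ⟨i, hi, hieq⟩ | ⟨i, j, hij, hj, hijeq⟩
        · left; omega
        · right; left; exact ⟨i, by omega, by rw [getD_append_lt _ _ hi]; omega⟩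
        · right; right
          exact ⟨i, j, hij, by omega, by
            rw [getD_append_lt _ _ (by omega), getD_append_lt _ _ hj]; omega⟩

lemma seen21_len {s : Int} {o : PySem.Dict Int (List Int)} {t : PySem.Dict (Int × Int) (List Int)}
    (h : InvA s o t) (u1 u2 : Int) (hne : u1 ≠ u2) (q : Int × Int) :
    (((if t.contains q then
        PySem.Set.update (PySem.Set.update (PySem.Set.update PySem.Set.empty (o.getD u1 [])) (o.getD u2 []))
          (t.getD q [])
      else PySem.Set.update (PySem.Set.update PySem.Set.empty (o.getD u1 [])) (o.getD u2 [])).length : Int)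
    = lenI (o.getD u1 []) + lenI (o.getD u2 []) +
      (if t.contains q then lenI (t.getD q []) else 0)) := by
  obtain ⟨hb1, hb2, hn1, hn2, hd1, hd2, hx, hk, hko, hkt⟩ := h
  have h12 : ((o.getD u1 []) ++ (o.getD u2 [])).Nodup :=
    List.Nodup.append (hn1 u1) (hn1 u2) (fun a ha => hd1 u1 u2 hne a ha)
  have h123 : (((o.getD u1 []) ++ (o.getD u2 [])) ++ (t.getD q [])).Nodup :=
    List.Nodup.append h12 (hn2 q) (by
      intro a ha
      rcases List.mem_append.mp ha with hm | hm
      · exact hx u1 q a hm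
      · exact hx u2 q a hm)
  have e2 : PySem.Set.update (PySem.Set.update PySem.Set.empty (o.getD u1 [])) (o.getD u2 [])
      = PySem.Set.ofList ((o.getD u1 []) ++ (o.getD u2 [])) := by
    rw [PySem.Set.ofList_append, PySem.Set.update_empty]
  have e3 : PySem.Set.update (PySem.Set.update (PySem.Set.update PySem.Set.empty (o.getD u1 [])) (o.getD u2 []))
      (t.getD q []) = PySem.Set.ofList (((o.getD u1 []) ++ (o.getD u2 [])) ++ (t.getD q [])) := by
    rw [PySem.Set.ofList_append, e2]
  split_ifs with hc
  · rw [e3, PySem.Set.ofList_eq_self_of_nodup _ h123]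
    simp [lenI]
    try push_cast
    try ring
  · rw [e2, PySem.Set.ofList_eq_self_of_nodup _ h12]
    simp [lenI]
    try push_cast
    try ring

lemma seen22_len {s : Int} {o : PySem.Dict Int (List Int)} {t : PySem.Dict (Int × Int) (List Int)}
    (h : InvA s o t) (p : Int × Int) (hne : p.1 ≠ p.2) :
    (((if o.contains p.2 then
          PySem.Set.update
            (if o.contains p.1 then PySem.Set.update (PySem.Set.ofList (t.getD p [])) (o.getD p.1 [])
             else PySem.Set.ofList (t.getD p []))
            (o.getD p.2 [])
        else if o.contains p.1 then PySem.Set.update (PySem.Set.ofList (t.getD p [])) (o.getD p.1 [])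
        else PySem.Set.ofList (t.getD p [])).length : Int)
      = lenI (t.getD p []) + (if o.contains p.1 then lenI (o.getD p.1 []) else 0) +
        (if o.contains p.2 then lenI (o.getD p.2 []) else 0)) := by
  obtain ⟨hb1, hb2, hn1, hn2, hd1, hd2, hx, hk, hko, hkt⟩ := h
  have hdt : ∀ u : Int, List.Disjoint (t.getD p []) (o.getD u []) := by
    intro u a ha hao
    exact (hx u p a hao) ha
  have h1 : ((t.getD p []) ++ (o.getD p.1 [])).Nodup :=
    List.Nodup.append (hn2 p) (hn1 p.1) (hdt p.1)
  have h12 : (((t.getD p []) ++ (o.getD p.1 [])) ++ (o.getD p.2 [])).Nodup :=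
    List.Nodup.append h1 (hn1 p.2) (by
      intro a ha
      rcases List.mem_append.mp ha with hm | hm
      · exact fun hb => (hdt p.2 hm) hb
      · exact hd1 p.1 p.2 hne a hm)
  have h2 : ((t.getD p []) ++ (o.getD p.2 [])).Nodup :=
    List.Nodup.append (hn2 p) (hn1 p.2) (hdt p.2)
  split_ifs with hc2 hc1 hc1
  · rw [show PySem.Set.update (PySem.Set.update (PySem.Set.ofList (t.getD p [])) (o.getD p.1 [])) (o.getD p.2 [])
        = PySem.Set.ofList (((t.getD p []) ++ (o.getD p.1 [])) ++ (o.getD p.2 [])) by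
      rw [PySem.Set.ofList_append, PySem.Set.ofList_append]]
    rw [PySem.Set.ofList_eq_self_of_nodup _ h12]
    simp [lenI]; try push_cast; try ring
  · rw [show PySem.Set.update (PySem.Set.ofList (t.getD p [])) (o.getD p.2 [])
        = PySem.Set.ofList ((t.getD p []) ++ (o.getD p.2 [])) by rw [PySem.Set.ofList_append]]
    rw [PySem.Set.ofList_eq_self_of_nodup _ h2]
    simp [lenI]; try push_cast; try ring
  · rw [show PySem.Set.update (PySem.Set.ofList (t.getD p [])) (o.getD p.1 [])
        = PySem.Set.ofList ((t.getD p []) ++ (o.getD p.1 [])) by rw [PySem.Set.ofList_append]]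
    rw [PySem.Set.ofList_eq_self_of_nodup _ h1]
    simp [lenI]; try push_cast; try ring
  · rw [PySem.Set.ofList_eq_self_of_nodup _ (hn2 p)]
    simp [lenI]

lemma foldl_ite_gt_eq_max {β : Type} (l : List β) (f : β → Int) (i : Int) :
    l.foldl (fun b x => if f x > b then f x else b) i = l.foldl (fun b x => max b (f x)) i := by
  congr 1
  funext b x
  split_ifs with h
  · exact (max_eq_right h.le).symm
  · exact (max_eq_left (not_lt.mp h)).symm

set_option maxHeartbeats 2000000 in
lemma finish_eq {s : Int} {o : PySem.Dict Int (List Int)} {t : PySem.Dict (Int × Int) (List Int)}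
    (h : InvA s o t) (vis : Int) :
    finishA vis o t = finishB vis (mapVals lenI o) (mapVals lenI t) := by
  have hn1 := h.2.2.1
  have hn2 := h.2.2.2.1
  have hd1 := h.2.2.2.2.1
  have hx := h.2.2.2.2.2.2.1
  have hkshape := h.2.2.2.2.2.2.2.1
  have hko := h.2.2.2.2.2.2.2.2.1
  have hkt := h.2.2.2.2.2.2.2.2.2
  unfold finishA finishB
  dsimp only
  rw [show (fun (t : Int × Int) (c : Int) => if c > t.1 then (c, t.1) else if c > t.2 then (t.1, c) else t) = top2step from rfl]
  rw [foldl_ite_gt_eq_max ((mapVals lenI t).items)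
    (fun q => q.2 + (mapVals lenI o).getD q.1.1 0 + (mapVals lenI o).getD q.1.2 0)]
  set K := o.keys with hK
  set vals := (mapVals lenI o).values with hvalsdef
  set T := List.foldl top2step (0, 0) vals with hTdef
  set itemsBT := (mapVals lenI t).items with hBTdef
  -- basic correspondences
  have hvals2 : vals = K.map (fun u => lenI (o.getD u [])) := by
    rw [hvalsdef, values_mapVals]
    show (o.items.map (fun p => p.2)).map lenI = _
    rw [PySem.Dict.items_eq_map_keys o hko ([] : List Int), List.map_map, List.map_map, ← hK]
    rfl
  have hpos : ∀ v ∈ vals, 0 ≤ v := by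
    intro v hv
    rw [hvals2] at hv
    obtain ⟨u, _, rfl⟩ := List.mem_map.mp hv
    exact Int.natCast_nonneg _
  obtain ⟨⟨h01, h02⟩, hA, hB, hC, hD⟩ := top2_spec vals hpos
  rw [← hTdef] at h01 h02 hA hB hC hD
  have hlenvals : vals.length = K.length := by rw [hvals2]; simp
  have hcont : ∀ u ∈ K, o.contains u = true := fun u hu =>
    (PySem.Dict.contains_iff_mem_keys o u).mpr (hK ▸ hu)
  have hgB : ∀ u, (mapVals lenI o).getD u 0 = if o.contains u then lenI (o.getD u []) else 0 :=
    getD_mapVals_zero o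
  have hitemsO : o.items = K.map (fun u => (u, o.getD u [])) := by
    rw [PySem.Dict.items_eq_map_keys o hko ([] : List Int), hK]
  have hitemsT : t.items = t.keys.map (fun p => (p, t.getD p [])) :=
    PySem.Dict.items_eq_map_keys t hkt ([] : List Int)
  have hBT2 : itemsBT = t.items.map (fun q => (q.1, lenI q.2)) := by
    rw [hBTdef]; rfl
  have hvget : ∀ i : Nat, i < K.length → vals.getD i 0 = lenI (o.getD (K.getD i 0) []) := by
    intro i hi
    rw [hvals2, List.getD_eq_getElem _ _ (by simpa using hi), List.getElem_map,
      List.getD_eq_getElem _ _ hi]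
  have hKmem : ∀ i : Nat, i < K.length → K.getD i 0 ∈ K := fun i hi => getD_mem K hi
  have hKne : ∀ i j : Nat, i < K.length → j < K.length → i ≠ j → K.getD i 0 ≠ K.getD j 0 := by
    intro i j hi hj hij
    rw [List.getD_eq_getElem _ _ hi, List.getD_eq_getElem _ _ hj]
    exact fun he => hij ((hko.getElem_inj_iff).mp he)
  have hvals1 : vals = o.items.map (fun p => lenI p.2) := by
    rw [hvalsdef, values_mapVals]
    show (o.items.map (fun p => p.2)).map lenI = _
    rw [List.map_map]
    rfl
  set S1 := List.foldl (fun mc p => max mc (vis + (p.2.length : Int))) vis o.items with hS1def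
  set S2 := List.foldl (fun mc i => List.foldl (fun mc j => max mc (vis + (List.length (if t.contains (if PySem.List.pyGetD K i 0 < PySem.List.pyGetD K j 0 then (PySem.List.pyGetD K i 0, PySem.List.pyGetD K j 0) else (PySem.List.pyGetD K j 0, PySem.List.pyGetD K i 0)) = true then ((PySem.Set.empty.update (o.getD (PySem.List.pyGetD K i 0) [])).update (o.getD (PySem.List.pyGetD K j 0) [])).update (t.getD (if PySem.List.pyGetD K i 0 < PySem.List.pyGetD K j 0 then (PySem.List.pyGetD K i 0, PySem.List.pyGetD K j 0) else (PySem.List.pyGetD K j 0, PySem.List.pyGetD K i 0)) []) else (PySem.Set.empty.update (o.getD (PySem.List.pyGetD K i 0) [])).update (o.getD (PySem.List.pyGetD K j 0) [])) : Int))) mc (PySem.List.pyRange (i + 1) (K.length : Int) 1)) S1 (PySem.List.pyRange 0 (K.length : Int) 1) with hS2def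
  set S3 := List.foldl (fun mc p => max mc (vis + (List.length (if o.contains p.1.2 = true then (if o.contains p.1.1 = true then (PySem.Set.ofList p.2).update (o.getD p.1.1 []) else PySem.Set.ofList p.2).update (o.getD p.1.2 []) else if o.contains p.1.1 = true then (PySem.Set.ofList p.2).update (o.getD p.1.1 []) else PySem.Set.ofList p.2) : Int))) S2 t.items with hS3def
  set best := List.foldl (fun b x => max b (x.2 + (mapVals lenI o).getD x.1.1 0 + (mapVals lenI o).getD x.1.2 0)) (T.1 + T.2) itemsBT with hbestdef
  have hS1ge0 : vis ≤ S1 := by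
    rw [hS1def]; exact (PySem.List.le_foldl_max_int o.items (fun p => vis + (p.2.length : Int)) vis).1
  have hS1elem : ∀ p ∈ o.items, vis + (p.2.length : Int) ≤ S1 := by
    rw [hS1def]; exact (PySem.List.le_foldl_max_int o.items (fun p => vis + (p.2.length : Int)) vis).2
  have hS2geS1 : S1 ≤ S2 := by
    rw [hS2def]; exact foldl_le_of_step_le _ (fun a i => (PySem.List.le_foldl_max_int _ _ a).1) _ _
  have hS3geS2 : S2 ≤ S3 := by
    rw [hS3def]; exact (PySem.List.le_foldl_max_int _ _ _).1
  have hS3elem : ∀ p ∈ t.items, vis + (List.length (if o.contains p.1.2 = true then (if o.contains p.1.1 = true then (PySem.Set.ofList p.2).update (o.getD p.1.1 []) else PySem.Set.ofList p.2).update (o.getD p.1.2 []) else if o.contains p.1.1 = true then (PySem.Set.ofList p.2).update (o.getD p.1.1 []) else PySem.Set.ofList p.2) : Int) ≤ S3 := by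
    rw [hS3def]; exact (PySem.List.le_foldl_max_int _ _ _).2
  have hbest_init : T.1 + T.2 ≤ best := by
    rw [hbestdef]; exact (PySem.List.le_foldl_max_int _ _ _).1
  have hbest_elem : ∀ q ∈ itemsBT, q.2 + (mapVals lenI o).getD q.1.1 0 + (mapVals lenI o).getD q.1.2 0 ≤ best := by
    rw [hbestdef]; exact (PySem.List.le_foldl_max_int _ _ _).2
  have hstage2 : ∀ i j : Int, 0 ≤ i → i < j → j < (K.length : Int) →
      (List.length (if t.contains (if PySem.List.pyGetD K i 0 < PySem.List.pyGetD K j 0 then (PySem.List.pyGetD K i 0, PySem.List.pyGetD K j 0) else (PySem.List.pyGetD K j 0, PySem.List.pyGetD K i 0)) = true then ((PySem.Set.empty.update (o.getD (PySem.List.pyGetD K i 0) [])).update (o.getD (PySem.List.pyGetD K j 0) [])).update (t.getD (if PySem.List.pyGetD K i 0 < PySem.List.pyGetD K j 0 then (PySem.List.pyGetD K i 0, PySem.List.pyGetD K j 0) else (PySem.List.pyGetD K j 0, PySem.List.pyGetD K i 0)) []) else (PySem.Set.empty.update (o.getD (PySem.List.pyGetD K i 0) [])).update (o.getD (PySem.List.pyGetD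 K j 0) [])) : Int) ≤ best := by
    intro i j h0i hij hjn
    rw [PySem.List.pyGetD_of_nonneg K (0 : Int) h0i, PySem.List.pyGetD_of_nonneg K (0 : Int) (by omega : (0:Int) ≤ j)]
    have hiN : i.toNat < K.length := by omega
    have hjN : j.toNat < K.length := by omega
    have hijN : i.toNat ≠ j.toNat := by omega
    have hne := hKne _ _ hiN hjN hijN
    rw [seen21_len h _ _ hne _]
    have hcu := hcont _ (hKmem _ hiN)
    have hcv := hcont _ (hKmem _ hjN)
    have hno : lenI (o.getD (K.getD i.toNat 0) []) + lenI (o.getD (K.getD j.toNat 0) []) ≤ best := by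
      have hvi := hvget i.toNat hiN
      have hvj := hvget j.toNat hjN
      have hBij := hB i.toNat j.toNat (by omega) (by rw [hlenvals]; exact hjN)
      rw [hvi, hvj] at hBij
      omega
    by_cases huv : K.getD i.toNat 0 < K.getD j.toNat 0
    · simp only [if_pos huv]
      split_ifs with hc
      · have hkmem := (PySem.Dict.contains_iff_mem_keys t _).mp hc
        have hitem : ((K.getD i.toNat 0, K.getD j.toNat 0),
            t.getD (K.getD i.toNat 0, K.getD j.toNat 0) []) ∈ t.items := by
          rw [hitemsT]; exact List.mem_map.mpr ⟨_, hkmem, rfl⟩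
        have hq := hbest_elem _ (by rw [hBT2]; exact List.mem_map.mpr ⟨_, hitem, rfl⟩)
        dsimp only at hq
        rw [hgB, hgB] at hq
        rw [if_pos hcu, if_pos hcv] at hq
        simp only [lenI] at hq ⊢
        omega
      · simp only [lenI] at hno ⊢
        omega
    · simp only [if_neg huv]
      split_ifs with hc
      · have hkmem := (PySem.Dict.contains_iff_mem_keys t _).mp hc
        have hitem : ((K.getD j.toNat 0, K.getD i.toNat 0),
            t.getD (K.getD j.toNat 0, K.getD i.toNat 0) []) ∈ t.items := by
          rw [hitemsT]; exact List.mem_map.mpr ⟨_, hkmem, rfl⟩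
        have hq := hbest_elem _ (by rw [hBT2]; exact List.mem_map.mpr ⟨_, hitem, rfl⟩)
        dsimp only at hq
        rw [hgB, hgB] at hq
        rw [if_pos hcv, if_pos hcu] at hq
        simp only [lenI] at hq ⊢
        omega
      · simp only [lenI] at hno ⊢
        omega
  have hstage2' : ∀ i j : Int, 0 ≤ i → i < j → j < (K.length : Int) →
      vals.getD i.toNat 0 + vals.getD j.toNat 0 ≤ (List.length (if t.contains (if PySem.List.pyGetD K i 0 < PySem.List.pyGetD K j 0 then (PySem.List.pyGetD K i 0, PySem.List.pyGetD K j 0) else (PySem.List.pyGetD K j 0, PySem.List.pyGetD K i 0)) = true then ((PySem.Set.empty.update (o.getD (PySem.List.pyGetD K i 0) [])).update (o.getD (PySem.List.pyGetD K j 0) [])).update (t.getD (if PySem.List.pyGetD K i 0 < PySem.List.pyGetD K j 0 then (PySem.List.pyGetD K i 0, PySem.List.pyGetD K j 0) else (PySem.List.pyGetD K j 0, PySem.List.pyGetD K i 0)) []) else (PySem.Set.empty.update (o.getD (PySem.List.pyGetD K i 0) [])).update (o.getD (PySem.List.pyGetD K j 0) [])) : Int) := by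
    intro i j h0i hij hjn
    rw [PySem.List.pyGetD_of_nonneg K (0 : Int) h0i, PySem.List.pyGetD_of_nonneg K (0 : Int) (by omega : (0:Int) ≤ j)]
    have hiN : i.toNat < K.length := by omega
    have hjN : j.toNat < K.length := by omega
    have hijN : i.toNat ≠ j.toNat := by omega
    have hne := hKne _ _ hiN hjN hijN
    rw [seen21_len h _ _ hne _]
    rw [hvget i.toNat hiN, hvget j.toNat hjN]
    by_cases huv : K.getD i.toNat 0 < K.getD j.toNat 0 <;>
      [simp only [if_pos huv]; simp only [if_neg huv]] <;>
      split_ifs with hc <;> simp only [lenI] <;> omega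
  have hstage3 : ∀ p ∈ t.items, (List.length (if o.contains p.1.2 = true then (if o.contains p.1.1 = true then (PySem.Set.ofList p.2).update (o.getD p.1.1 []) else PySem.Set.ofList p.2).update (o.getD p.1.2 []) else if o.contains p.1.1 = true then (PySem.Set.ofList p.2).update (o.getD p.1.1 []) else PySem.Set.ofList p.2) : Int) ≤ best := by
    intro p hp
    have hp2 : p.2 = t.getD p.1 [] := (PySem.Dict.getD_of_mem_items t (Prod.mk.eta.symm ▸ hp) hkt []).symm
    have hpne : p.1.1 ≠ p.1.2 := ne_of_lt (hkshape p.1 (PySem.Dict.mem_keys_of_mem_items t hp))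
    rw [hp2, seen22_len h p.1 hpne]
    have hq := hbest_elem _ (by rw [hBT2]; exact List.mem_map.mpr ⟨p, hp, rfl⟩)
    dsimp only at hq
    rw [hgB, hgB, hp2] at hq
    omega
  apply le_antisymm
  · rw [hS3def]
    apply foldl_max_le
    · rw [hS2def]
      apply nested_le
      · rw [hS1def]
        apply foldl_max_le
        · omega
        · intro p hp
          have hv1 : lenI p.2 ∈ vals := by rw [hvals1]; exact List.mem_map.mpr ⟨p, hp, rfl⟩
          have hva := hA _ hv1
          simp only [lenI] at hva
          omega
      · intro i hi j hj
        rw [PySem.List.mem_pyRange_one] at hi hj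
        have := hstage2 i j hi.1 (by omega) hj.2
        omega
    · intro p hp
      have := hstage3 p hp
      omega
  · have hbb : best ≤ S3 - vis := by
      rw [hbestdef]
      apply foldl_max_le
      · rcases hD with h0 | ⟨i, hi, hieq⟩ | ⟨i, j, hij, hj, hijeq⟩
        · omega
        · rw [hlenvals] at hi
          have hv := hvget i hi
          have hmemO : (K.getD i 0, o.getD (K.getD i 0) []) ∈ o.items := by
            rw [hitemsO]; exact List.mem_map.mpr ⟨_, hKmem i hi, rfl⟩
          have h1 := hS1elem _ hmemO
          dsimp only at h1
          simp only [lenI] at hv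
          omega
        · rw [hlenvals] at hj
          have hmem1 : ((i : Nat) : Int) ∈ PySem.List.pyRange 0 (K.length : Int) 1 := by
            rw [PySem.List.mem_pyRange_one]; omega
          have hmem2 : ((j : Nat) : Int) ∈ PySem.List.pyRange (((i : Nat) : Int) + 1) (K.length : Int) 1 := by
            rw [PySem.List.mem_pyRange_one]; omega
          have h2 := nested_ge (PySem.List.pyRange 0 (K.length : Int) 1)
            (fun i => PySem.List.pyRange (i + 1) (K.length : Int) 1)
            (fun i j => vis + (List.length (if t.contains (if PySem.List.pyGetD K i 0 < PySem.List.pyGetD K j 0 then (PySem.List.pyGetD K i 0, PySem.List.pyGetD K j 0) else (PySem.List.pyGetD K j 0, PySem.List.pyGetD K i 0)) = true then ((PySem.Set.empty.update (o.getD (PySem.List.pyGetD K i 0) [])).update (o.getD (PySem.List.pyGetD K j 0) [])).update (t.getD (if PySem.List.pyGetD K i 0 < PySem.List.pyGetD K j 0 then (PySem.List.pyGetD K i 0, PySem.List.pyGetD K j 0) else (PySem.List.pyGetD K j 0, PySem.List.pyGetD K i 0)) []) else (PySem.Set.empty.update (o.getD (PySem.List.pyGetD K i 0) [])).update (o.getD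 (PySem.List.pyGetD K j 0) [])) : Int)) S1 ((i : Nat) : Int) ((j : Nat) : Int) hmem1 hmem2
          simp only at h2
          rw [← hS2def] at h2
          have h3 := hstage2' ((i : Nat) : Int) ((j : Nat) : Int) (by omega) (by omega) (by omega)
          simp only [Int.toNat_natCast] at h3
          omega
      · intro q hq
        rw [hBT2] at hq
        obtain ⟨p, hp, rfl⟩ := List.mem_map.mp hq
        have hp2 : p.2 = t.getD p.1 [] := (PySem.Dict.getD_of_mem_items t (Prod.mk.eta.symm ▸ hp) hkt []).symm
        have hpne : p.1.1 ≠ p.1.2 := ne_of_lt (hkshape p.1 (PySem.Dict.mem_keys_of_mem_items t hp))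
        have h3 := hS3elem p hp
        rw [hp2, seen22_len h p.1 hpne] at h3
        dsimp only
        rw [hgB, hgB, hp2]
        omega
    omega


theorem solve_spec : Claim_equal_solve := by
  unfold Claim_equal_solve
  intro n m k friends comments _
  unfold Spec_solve
  rw [solve_eq, solve_alt_eq]
  dsimp only
  obtain ⟨s', hinv⟩ := InvA_fold (PySem.Set.ofList friends) comments 0 0 _ _ InvA_init
  rw [show (PySem.Dict.empty : PySem.Dict Int Int) = mapVals lenI PySem.Dict.empty from rfl,
    show (PySem.Dict.empty : PySem.Dict (Int × Int) Int) = mapVals lenI PySem.Dict.empty from rfl,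
    phase1 (PySem.Set.ofList friends) comments 0 0 PySem.Dict.empty PySem.Dict.empty]
  exact finish_eq hinv _
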